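-- pv_equiv track=rewrite | github.com/simmarum/AdventOfCode | 2018/day-25/main.py | find_constellations
-- ===== SOURCE A (Python) =====
-- from collections import defaultdict, deque
--
-- def find_constellations(stars):
--     constellations = defaultdict(set)
--     for s1i, s1 in enumerate(stars):
--         for s2i, s2 in enumerate(stars):
--             if (abs(s1[0] - s2[0]) + abs(s1[1] - s2[1]) +
--                     abs(s1[2] - s2[2]) + abs(s1[3] - s2[3])) <= 3:
--                 constellations[s1i].add(s2i)
--
--     seen = set()
--     constellations_num = 0
--     for si in range(len(stars)):
--         if si not in seen:
--             constellations_num += 1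
--             queue = deque()
--             queue.append(si)
--             while queue:
--                 si_seen = queue.popleft()
--                 if si_seen not in seen:
--                     seen.add(si_seen)
--                     [queue.append(cs) for cs in constellations[si_seen]]
--
--     return constellations_num
-- ===== SOURCE B (Python) =====
-- def find_constellations(stars):
--     n = len(stars)
--
--     def close(a, b):
--         return (abs(a[0] - b[0]) + abs(a[1] - b[1]) +
--                 abs(a[2] - b[2]) + abs(a[3] - b[3])) <= 3
--
--     assigned = set()
--     count = 0
--     for i in range(n):
--         if i in assigned:
--             continue
--         count += 1
--         comp = {i}
--         for _ in range(n):
--             new = {j for j in range(n)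
--                    if j not in comp and any(close(stars[j], stars[m]) for m in comp)}
--             if not new:
--                 break
--             comp |= new
--         assigned |= comp
--     return count
-- ===== Notes on version B (the rewrite author's own statement) =====
-- stated objective: alternative
-- what changed: Replaced the precomputed adjacency dict plus per-start BFS with a deque by a round-based fixed-point saturation: each unassigned index seeds a component set that is repeatedly extended with all indices close to it until no new index appears; no adjacency structure and no queue are kept.
import Mathlib
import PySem

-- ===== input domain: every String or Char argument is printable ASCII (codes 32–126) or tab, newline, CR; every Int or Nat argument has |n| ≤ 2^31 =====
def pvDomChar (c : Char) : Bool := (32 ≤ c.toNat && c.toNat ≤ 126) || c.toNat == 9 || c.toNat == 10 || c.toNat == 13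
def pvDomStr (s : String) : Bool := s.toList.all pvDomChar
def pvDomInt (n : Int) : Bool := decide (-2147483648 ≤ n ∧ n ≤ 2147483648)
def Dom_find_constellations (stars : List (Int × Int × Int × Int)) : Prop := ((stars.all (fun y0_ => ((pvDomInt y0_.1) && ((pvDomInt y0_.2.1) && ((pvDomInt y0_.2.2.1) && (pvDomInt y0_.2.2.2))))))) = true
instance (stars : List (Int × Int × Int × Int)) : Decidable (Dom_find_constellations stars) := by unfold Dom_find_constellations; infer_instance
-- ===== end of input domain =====

-- B replaces A's precomputed adjacency dict + per-start BFS queue by a round-based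
-- fixed-point saturation of each new component; an alternative algorithm of similar cost.

-- ===== PORT A =====
def pvDist (a b : Int × Int × Int × Int) : Int :=
  |a.1 - b.1| + |a.2.1 - b.2.1| + |a.2.2.1 - b.2.2.1| + |a.2.2.2 - b.2.2.2|

def pvAdj (stars : List (Int × Int × Int × Int)) : PySem.Dict Int (PySem.Set Int) :=
  (PySem.List.enumerate stars).foldl
    (fun d p =>
      (PySem.List.enumerate stars).foldl
        (fun d q =>
          if pvDist p.2 q.2 ≤ 3 then
            d.insert p.1 (PySem.Set.add (d.getD p.1 PySem.Set.empty) q.1)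
          else d) d)
    PySem.Dict.empty

-- the fuel argument only makes the while-loop total; it is provably sufficient
def pvBFS (adj : PySem.Dict Int (PySem.Set Int)) : Nat → List Int → PySem.Set Int → PySem.Set Int
  | 0, _, seen => seen
  | _ + 1, [], seen => seen
  | fuel + 1, q :: qs, seen =>
    if PySem.Set.contains seen q then pvBFS adj fuel qs seen
    else pvBFS adj fuel (qs ++ adj.getD q PySem.Set.empty) (PySem.Set.add seen q)

def find_constellations (stars : List (Int × Int × Int × Int)) : Int :=
  ((PySem.List.pyRange 0 (stars.length : Int)).foldl
    (fun st si =>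
      if PySem.Set.contains st.1 si then st
      else (pvBFS (pvAdj stars) ((stars.length + 1) * (stars.length + 1)) [si] st.1, st.2 + 1))
    (PySem.Set.empty, (0 : Int))).2

-- ===== PORT B =====
def pvStar (stars : List (Int × Int × Int × Int)) (i : Int) : Int × Int × Int × Int :=
  PySem.List.pyGetD stars i (0, 0, 0, 0)

def pvNew (stars : List (Int × Int × Int × Int)) (comp : PySem.Set Int) : List Int :=
  (PySem.List.pyRange 0 (stars.length : Int)).filter
    (fun j => !(PySem.Set.contains comp j) &&
      comp.any (fun m => decide (pvDist (pvStar stars j) (pvStar stars m) ≤ 3)))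

-- the fuel argument is B's 'for _ in range(n)' round counter
def pvSat (stars : List (Int × Int × Int × Int)) : Nat → PySem.Set Int → PySem.Set Int
  | 0, comp => comp
  | fuel + 1, comp =>
    let nw := pvNew stars comp
    if nw = [] then comp else pvSat stars fuel (PySem.Set.update comp nw)

def find_constellations_alt (stars : List (Int × Int × Int × Int)) : Int :=
  ((PySem.List.pyRange 0 (stars.length : Int)).foldl
    (fun st i =>
      if PySem.Set.contains st.1 i then st
      else (PySem.Set.update st.1 (pvSat stars stars.length (PySem.Set.add PySem.Set.empty i)),
            st.2 + 1))
    (PySem.Set.empty, (0 : Int))).2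

-- ===== PRECONDITION & SPEC =====
def Spec_find_constellations (stars : List (Int × Int × Int × Int)) (out : Int) : Prop := out = find_constellations_alt stars
instance (stars : List (Int × Int × Int × Int)) (out : Int) : Decidable (Spec_find_constellations stars out) := by unfold Spec_find_constellations; infer_instance

-- ===== CLAIM (what is proved, stated in full; the proofs are below) =====
def Claim_equal_find_constellations : Prop := ∀ (stars : List (Int × Int × Int × Int)), Dom_find_constellations stars → Spec_find_constellations stars (find_constellations stars)

-- ===== LEMMAS AND PROOFS =====

-- the closeness graph on indices, and its reflexive-transitive closure
def pvE (stars : List (Int × Int × Int × Int)) (a b : Int) : Prop :=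
  0 ≤ a ∧ a < (stars.length : Int) ∧ 0 ≤ b ∧ b < (stars.length : Int) ∧
    pvDist (pvStar stars a) (pvStar stars b) ≤ 3

def pvConn (stars : List (Int × Int × Int × Int)) : Int → Int → Prop :=
  Relation.ReflTransGen (pvE stars)

lemma pvDist_comm (a b : Int × Int × Int × Int) : pvDist a b = pvDist b a := by
  simp only [pvDist, abs_sub_comm]

lemma pvConn_closed_mem {stars : List (Int × Int × Int × Int)} {F : List Int} {i x : Int}
    (hi : i ∈ F) (hcl : ∀ y ∈ F, ∀ z, pvE stars y z → z ∈ F)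
    (h : pvConn stars i x) : x ∈ F := by
  induction h with
  | refl => exact hi
  | tail hconn hstep ih => exact hcl _ ih _ hstep

lemma pvNL_nodup (n : Nat) : (PySem.List.pyRange 0 (n : Int)).Nodup := by
  rw [PySem.List.pyRange_zero_natCast]
  exact List.Nodup.map (fun a b h => by exact_mod_cast h) List.nodup_range

lemma pvNL_length (n : Nat) : (PySem.List.pyRange 0 (n : Int)).length = n := by
  rw [PySem.List.pyRange_zero_natCast]; simp

lemma pvLen_le {s : List Int} {n : Nat} (hnd : s.Nodup)
    (hb : ∀ x ∈ s, 0 ≤ x ∧ x < (n : Int)) : s.length ≤ n := by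
  have hsub : s ⊆ PySem.List.pyRange 0 (n : Int) := by
    intro x hx
    rw [PySem.List.mem_pyRange_one]
    exact hb x hx
  have h := (hnd.subperm hsub).length_le
  rwa [pvNL_length] at h

lemma pvLen_lt {s : List Int} {n : Nat} (hnd : s.Nodup)
    (hb : ∀ x ∈ s, 0 ≤ x ∧ x < (n : Int)) {q : Int}
    (hq : q ∉ s) (h0 : 0 ≤ q) (h1 : q < (n : Int)) : s.length < n := by
  have hnd' : (q :: s).Nodup := List.nodup_cons.mpr ⟨hq, hnd⟩
  have h := pvLen_le hnd' (by
    intro x hx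
    rcases List.mem_cons.mp hx with h | h
    · subst h; exact ⟨h0, h1⟩
    · exact hb x h)
  simp only [List.length_cons] at h
  omega

lemma pvMem_enumerate {α : Type} :
    ∀ (xs : List α) (start : Int) (p : Int × α),
      p ∈ PySem.List.enumerate xs start ↔
        ∃ k : Nat, ∃ h : k < xs.length, p = (start + (k : Int), xs[k]) := by
  intro xs
  induction xs with
  | nil => intro start p; simp [PySem.List.enumerate]
  | cons x t ih =>
    intro start p
    rw [show PySem.List.enumerate (x :: t) start = (start, x) :: PySem.List.enumerate t (start + 1) from rfl]
    simp only [List.mem_cons, ih]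
    constructor
    · rintro (rfl | ⟨k, hk, rfl⟩)
      · exact ⟨0, by simp, by simp⟩
      · refine ⟨k + 1, by simpa using Nat.succ_lt_succ hk, ?_⟩
        simp only [List.getElem_cons_succ, Prod.mk.injEq, and_true]
        push_cast; ring
    · rintro ⟨k, hk, rfl⟩
      cases k with
      | zero => left; simp
      | succ k =>
        right
        refine ⟨k, by simpa using Nat.lt_of_succ_lt_succ hk, ?_⟩
        simp only [List.getElem_cons_succ, Prod.mk.injEq, and_true]
        push_cast; ring

lemma pvStar_eq {stars : List (Int × Int × Int × Int)} {k : Nat} (h : k < stars.length) :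
    pvStar stars (k : Int) = stars[k] := by
  simp [pvStar, PySem.List.pyGetD_natCast, List.getD_eq_getElem?_getD, List.getElem?_eq_getElem h]

-- adjacency-dict construction, abstracted
def pvInnerF (i : Int) (s1 : Int × Int × Int × Int)
    (d : PySem.Dict Int (PySem.Set Int)) (q : Int × (Int × Int × Int × Int)) :
    PySem.Dict Int (PySem.Set Int) :=
  if pvDist s1 q.2 ≤ 3 then d.insert i (PySem.Set.add (d.getD i PySem.Set.empty) q.1) else d

def pvOuterF (enum : List (Int × (Int × Int × Int × Int)))
    (d : PySem.Dict Int (PySem.Set Int)) (p : Int × (Int × Int × Int × Int)) :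
    PySem.Dict Int (PySem.Set Int) :=
  enum.foldl (pvInnerF p.1 p.2) d

lemma pvAdj_eq (stars : List (Int × Int × Int × Int)) :
    pvAdj stars = (PySem.List.enumerate stars).foldl
      (pvOuterF (PySem.List.enumerate stars)) PySem.Dict.empty := rfl

lemma pvInner_getD_ne (i k : Int) (hk : k ≠ i) (s1 : Int × Int × Int × Int) :
    ∀ (L : List (Int × (Int × Int × Int × Int))) (d : PySem.Dict Int (PySem.Set Int)),
      (L.foldl (pvInnerF i s1) d).getD k PySem.Set.empty = d.getD k PySem.Set.empty := by
  intro L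
  induction L with
  | nil => intro d; rfl
  | cons q L ih =>
    intro d
    rw [List.foldl_cons, ih]
    unfold pvInnerF
    split
    · rw [PySem.Dict.getD_insert_of_ne _ _ _ hk]
    · rfl

lemma pvInner_getD_mem (i : Int) (s1 : Int × Int × Int × Int) :
    ∀ (L : List (Int × (Int × Int × Int × Int))) (d : PySem.Dict Int (PySem.Set Int)) (j : Int),
      j ∈ (L.foldl (pvInnerF i s1) d).getD i PySem.Set.empty ↔
        j ∈ d.getD i PySem.Set.empty ∨ ∃ q ∈ L, pvDist s1 q.2 ≤ 3 ∧ j = q.1 := by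
  intro L
  induction L with
  | nil => intro d j; simp
  | cons q L ih =>
    intro d j
    rw [List.foldl_cons, ih]
    unfold pvInnerF
    split
    · rename_i hq
      rw [PySem.Dict.getD_insert_self, PySem.Set.mem_add]
      simp only [List.mem_cons]
      constructor
      · rintro ((h | hj) | ⟨q', hq', hd, hj⟩)
        · exact Or.inl h
        · exact Or.inr ⟨q, Or.inl rfl, hq, hj⟩
        · exact Or.inr ⟨q', Or.inr hq', hd, hj⟩
      · rintro (h | ⟨q', hq'', hd, hj⟩)
        · exact Or.inl (Or.inl h)
        · rcases hq'' with rfl | h'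
          · exact Or.inl (Or.inr hj)
          · exact Or.inr ⟨q', h', hd, hj⟩
    · rename_i hq
      simp only [List.mem_cons]
      constructor
      · rintro (h | ⟨q', hq', hd, hj⟩)
        · exact Or.inl h
        · exact Or.inr ⟨q', Or.inr hq', hd, hj⟩
      · rintro (h | ⟨q', hq'', hd, hj⟩)
        · exact Or.inl h
        · rcases hq'' with rfl | h'
          · exact absurd hd hq
          · exact Or.inr ⟨q', h', hd, hj⟩

lemma pvInner_getD_nodup (i : Int) (s1 : Int × Int × Int × Int) :
    ∀ (L : List (Int × (Int × Int × Int × Int))) (d : PySem.Dict Int (PySem.Set Int)),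
      (d.getD i PySem.Set.empty).Nodup →
      ((L.foldl (pvInnerF i s1) d).getD i PySem.Set.empty).Nodup := by
  intro L
  induction L with
  | nil => intro d h; exact h
  | cons q L ih =>
    intro d h
    rw [List.foldl_cons]
    apply ih
    unfold pvInnerF
    split
    · rw [PySem.Dict.getD_insert_self]
      exact PySem.Set.nodup_add _ _ h
    · exact h

lemma pvOuter_spec (enum : List (Int × (Int × Int × Int × Int))) :
    ∀ (P : List (Int × (Int × Int × Int × Int))),
      (∀ (k j : Int), j ∈ (P.foldl (pvOuterF enum) PySem.Dict.empty).getD k PySem.Set.empty ↔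
        ∃ p ∈ P, p.1 = k ∧ ∃ q ∈ enum, pvDist p.2 q.2 ≤ 3 ∧ j = q.1) ∧
      (∀ k : Int, ((P.foldl (pvOuterF enum) PySem.Dict.empty).getD k PySem.Set.empty).Nodup) := by
  intro P
  induction P using List.reverseRecOn with
  | nil =>
    refine ⟨?_, ?_⟩
    · intro k j; simp [PySem.Dict.getD_empty]
    · intro k; simp [PySem.Dict.getD_empty]
  | append_singleton P p ih =>
    rw [List.foldl_append, List.foldl_cons, List.foldl_nil]
    constructor
    · intro k j
      by_cases hk : k = p.1
      · subst hk
        simp only [pvOuterF]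
        rw [pvInner_getD_mem, ih.1]
        constructor
        · rintro (⟨p', hp', hpk, rest⟩ | ⟨q, hq, hd, hj⟩)
          · exact ⟨p', List.mem_append_left _ hp', hpk, rest⟩
          · exact ⟨p, List.mem_append_right _ List.mem_cons_self, rfl, q, hq, hd, hj⟩
        · rintro ⟨p', hp', hpk, rest⟩
          rcases List.mem_append.mp hp' with h | h
          · exact Or.inl ⟨p', h, hpk, rest⟩
          · rcases List.mem_cons.mp h with rfl | h'
            · exact Or.inr rest
            · exact absurd h' (List.not_mem_nil)
      · simp only [pvOuterF]
        rw [pvInner_getD_ne _ _ hk, ih.1]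
        constructor
        · rintro ⟨p', hp', hpk, rest⟩
          exact ⟨p', List.mem_append_left _ hp', hpk, rest⟩
        · rintro ⟨p', hp', hpk, rest⟩
          rcases List.mem_append.mp hp' with h | h
          · exact ⟨p', h, hpk, rest⟩
          · rcases List.mem_cons.mp h with rfl | h'
            · exact absurd hpk.symm hk
            · exact absurd h' (List.not_mem_nil)
    · intro k
      by_cases hk : k = p.1
      · subst hk
        simp only [pvOuterF]
        exact pvInner_getD_nodup _ _ _ _ (ih.2 _)
      · simp only [pvOuterF]
        rw [pvInner_getD_ne _ _ hk]
        exact ih.2 _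

lemma pvAdj_getD_mem (stars : List (Int × Int × Int × Int)) (i j : Int) :
    j ∈ (pvAdj stars).getD i PySem.Set.empty ↔ pvE stars i j := by
  rw [pvAdj_eq, (pvOuter_spec _ _).1]
  constructor
  · rintro ⟨p, hp, hpk, q, hq, hd, rfl⟩
    obtain ⟨k, hk, rfl⟩ := (pvMem_enumerate _ _ _).mp hp
    obtain ⟨l, hl, rfl⟩ := (pvMem_enumerate _ _ _).mp hq
    simp only [zero_add] at hpk ⊢
    subst hpk
    refine ⟨by positivity, by exact_mod_cast hk, by positivity, by exact_mod_cast hl, ?_⟩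
    rwa [pvStar_eq hk, pvStar_eq hl]
  · rintro ⟨h0, h1, h2, h3, hd⟩
    refine ⟨(i, pvStar stars i), ?_, rfl, (j, pvStar stars j), ?_, hd, rfl⟩
    · refine (pvMem_enumerate _ _ _).mpr ⟨i.toNat, by omega, ?_⟩
      have he := pvStar_eq (stars := stars) (k := i.toNat) (by omega)
      simp only [Prod.mk.injEq]
      exact ⟨by omega, by rw [← he, Int.toNat_of_nonneg h0]⟩
    · refine (pvMem_enumerate _ _ _).mpr ⟨j.toNat, by omega, ?_⟩
      have he := pvStar_eq (stars := stars) (k := j.toNat) (by omega)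
      simp only [Prod.mk.injEq]
      exact ⟨by omega, by rw [← he, Int.toNat_of_nonneg h2]⟩

lemma pvAdj_getD_nodup (stars : List (Int × Int × Int × Int)) (i : Int) :
    ((pvAdj stars).getD i PySem.Set.empty).Nodup := by
  rw [pvAdj_eq]
  exact (pvOuter_spec _ _).2 _

-- pvNew characterization
lemma pvNew_mem (stars : List (Int × Int × Int × Int)) (comp : PySem.Set Int) (j : Int) :
    j ∈ pvNew stars comp ↔
      0 ≤ j ∧ j < (stars.length : Int) ∧ j ∉ comp ∧
        ∃ m ∈ comp, pvDist (pvStar stars j) (pvStar stars m) ≤ 3 := by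
  simp only [pvNew, List.mem_filter, PySem.List.mem_pyRange_one, Bool.and_eq_true,
    Bool.not_eq_true', List.any_eq_true, decide_eq_true_eq, PySem.Set.contains_eq_listContains,
    List.contains_eq_mem, decide_eq_false_iff_not]
  tauto

lemma pvNew_nodup (stars : List (Int × Int × Int × Int)) (comp : PySem.Set Int) :
    (pvNew stars comp).Nodup :=
  (pvNL_nodup stars.length).filter _

lemma pvNew_closed {stars : List (Int × Int × Int × Int)} {comp : PySem.Set Int}
    (h : pvNew stars comp = []) :
    ∀ x ∈ comp, ∀ y, pvE stars x y → y ∈ comp := by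
  intro x hx y hy
  by_contra hyc
  have hmem : y ∈ pvNew stars comp := by
    refine (pvNew_mem _ _ _).mpr ⟨hy.2.2.1, hy.2.2.2.1, hyc, x, hx, ?_⟩
    rw [pvDist_comm]
    exact hy.2.2.2.2
  rw [h] at hmem
  exact absurd hmem (List.not_mem_nil)

-- saturation computes exactly the connected component of i
lemma pvSat_spec (stars : List (Int × Int × Int × Int)) (i : Int) :
    ∀ (fuel : Nat) (comp : PySem.Set Int),
      comp.Nodup → i ∈ comp →
      (∀ x ∈ comp, (0 ≤ x ∧ x < (stars.length : Int)) ∧ pvConn stars i x) →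
      stars.length ≤ fuel + comp.length →
      ∀ x, x ∈ pvSat stars fuel comp ↔ pvConn stars i x := by
  intro fuel
  induction fuel with
  | zero =>
    intro comp hnd hi hprop hfuel x
    have hempty : pvNew stars comp = [] := by
      by_contra h
      obtain ⟨j, hj⟩ := List.exists_mem_of_ne_nil _ h
      have hj' := (pvNew_mem _ _ _).mp hj
      have := pvLen_lt hnd (fun x hx => (hprop x hx).1) hj'.2.2.1 hj'.1 hj'.2.1
      omega
    show x ∈ comp ↔ pvConn stars i x
    constructor
    · intro hx; exact (hprop x hx).2
    · intro hx; exact pvConn_closed_mem hi (pvNew_closed hempty) hx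
  | succ fuel ih =>
    intro comp hnd hi hprop hfuel x
    show x ∈ (let nw := pvNew stars comp;
      if nw = [] then comp else pvSat stars fuel (PySem.Set.update comp nw)) ↔ pvConn stars i x
    by_cases hemp : pvNew stars comp = []
    · simp only [hemp, if_pos]
      show x ∈ comp ↔ pvConn stars i x
      constructor
      · intro hx; exact (hprop x hx).2
      · intro hx; exact pvConn_closed_mem hi (pvNew_closed hemp) hx
    · simp only [if_neg hemp]
      have hdis : ∀ y ∈ pvNew stars comp, y ∉ comp := fun y hy => ((pvNew_mem _ _ _).mp hy).2.2.1
      have hupd : PySem.Set.update comp (pvNew stars comp) = comp ++ pvNew stars comp :=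
        PySem.Set.update_eq_append_of_disjoint _ _ (pvNew_nodup _ _) hdis
      apply ih
      · exact PySem.Set.nodup_update _ _ hnd
      · exact (PySem.Set.mem_update _ _ _).mpr (Or.inl hi)
      · intro y hy
        rcases (PySem.Set.mem_update _ _ _).mp hy with h | h
        · exact hprop y h
        · have h' := (pvNew_mem _ _ _).mp h
          obtain ⟨m, hm, hd⟩ := h'.2.2.2
          have hEmy : pvE stars m y :=
            ⟨((hprop m hm).1).1, ((hprop m hm).1).2, h'.1, h'.2.1, by rw [pvDist_comm]; exact hd⟩
          exact ⟨⟨h'.1, h'.2.1⟩, Relation.ReflTransGen.tail (hprop m hm).2 hEmy⟩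
      · have h1 : 1 ≤ (pvNew stars comp).length :=
          List.length_pos_iff.mpr hemp
        rw [hupd, List.length_append]
        omega

-- the BFS master lemma
lemma pvBFS_spec (stars : List (Int × Int × Int × Int)) :
    ∀ (fuel : Nat) (queue : List Int) (seen : PySem.Set Int),
      seen.Nodup →
      (∀ x ∈ seen, 0 ≤ x ∧ x < (stars.length : Int)) →
      (∀ x ∈ seen, ∀ y, pvE stars x y → y ∈ seen ∨ y ∈ queue) →
      (∀ x ∈ queue, 0 ≤ x ∧ x < (stars.length : Int)) →
      (stars.length - seen.length) * (stars.length + 1) + queue.length ≤ fuel →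
      (∀ x ∈ seen, x ∈ pvBFS (pvAdj stars) fuel queue seen) ∧
      (∀ x ∈ queue, x ∈ pvBFS (pvAdj stars) fuel queue seen) ∧
      (∀ x ∈ pvBFS (pvAdj stars) fuel queue seen, x ∈ seen ∨ ∃ q ∈ queue, pvConn stars q x) ∧
      (∀ x ∈ pvBFS (pvAdj stars) fuel queue seen, ∀ y, pvE stars x y → y ∈ pvBFS (pvAdj stars) fuel queue seen) ∧
      (pvBFS (pvAdj stars) fuel queue seen).Nodup ∧
      (∀ x ∈ pvBFS (pvAdj stars) fuel queue seen, 0 ≤ x ∧ x < (stars.length : Int)) := by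
  intro fuel
  induction fuel with
  | zero =>
    intro queue seen hnd hb hK hqr hfuel
    have hqe : queue = [] :=
      List.length_eq_zero_iff.mp (Nat.le_zero.mp (le_trans (Nat.le_add_left _ _) hfuel))
    subst hqe
    show _ ∧ _
    refine ⟨fun x hx => hx, fun x hx => absurd hx (List.not_mem_nil), ?_, ?_, hnd, hb⟩
    · exact fun x hx => Or.inl hx
    · intro x hx y hy
      rcases hK x hx y hy with h | h
      · exact h
      · exact absurd h (List.not_mem_nil)
  | succ fuel ih =>
    intro queue seen hnd hb hK hqr hfuel
    match queue with
    | [] =>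
      show _ ∧ _
      refine ⟨fun x hx => hx, fun x hx => absurd hx (List.not_mem_nil), ?_, ?_, hnd, hb⟩
      · exact fun x hx => Or.inl hx
      · intro x hx y hy
        rcases hK x hx y hy with h | h
        · exact h
        · exact absurd h (List.not_mem_nil)
    | q :: qs =>
      by_cases hq : q ∈ seen
      · have hc : PySem.Set.contains seen q = true := (PySem.Set.contains_iff _ _).mpr hq
        rw [show pvBFS (pvAdj stars) (fuel + 1) (q :: qs) seen = pvBFS (pvAdj stars) fuel qs seen by
          rw [pvBFS, if_pos hc]]
        have hfuel' : (stars.length - seen.length) * (stars.length + 1) + qs.length ≤ fuel := by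
          have h := hfuel
          simp only [List.length_cons] at h
          omega
        have hK' : ∀ x ∈ seen, ∀ y, pvE stars x y → y ∈ seen ∨ y ∈ qs := by
          intro x hx y hy
          rcases hK x hx y hy with h | h
          · exact Or.inl h
          · rcases List.mem_cons.mp h with rfl | h'
            · exact Or.inl hq
            · exact Or.inr h'
        obtain ⟨c1, c2, c3, c4, c5, c6⟩ :=
          ih qs seen hnd hb hK' (fun x hx => hqr x (List.mem_cons_of_mem _ hx)) hfuel'
        refine ⟨c1, ?_, ?_, c4, c5, c6⟩
        · intro x hx
          rcases List.mem_cons.mp hx with rfl | h'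
          · exact c1 _ hq
          · exact c2 _ h'
        · intro x hx
          rcases c3 x hx with h | ⟨q', hq', hcc⟩
          · exact Or.inl h
          · exact Or.inr ⟨q', List.mem_cons_of_mem _ hq', hcc⟩
      · have hc : ¬ (PySem.Set.contains seen q = true) := fun h => hq ((PySem.Set.contains_iff _ _).mp h)
        rw [show pvBFS (pvAdj stars) (fuel + 1) (q :: qs) seen =
            pvBFS (pvAdj stars) fuel (qs ++ (pvAdj stars).getD q PySem.Set.empty) (PySem.Set.add seen q) by
          rw [pvBFS, if_neg hc]]
        have hadd : PySem.Set.add seen q = seen ++ [q] := PySem.Set.add_of_not_mem hq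
        have hq0 := hqr q List.mem_cons_self
        -- hypotheses for the IH
        have hnd' : (PySem.Set.add seen q).Nodup := PySem.Set.nodup_add _ _ hnd
        have hb' : ∀ x ∈ PySem.Set.add seen q, 0 ≤ x ∧ x < (stars.length : Int) := by
          intro x hx
          rcases (PySem.Set.mem_add _ _ _).mp hx with h | rfl
          · exact hb x h
          · exact hq0
        have hK' : ∀ x ∈ PySem.Set.add seen q, ∀ y, pvE stars x y →
            y ∈ PySem.Set.add seen q ∨ y ∈ qs ++ (pvAdj stars).getD q PySem.Set.empty := by
          intro x hx y hy
          rcases (PySem.Set.mem_add _ _ _).mp hx with h | rfl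
          · rcases hK x h y hy with h' | h'
            · exact Or.inl ((PySem.Set.mem_add _ _ _).mpr (Or.inl h'))
            · rcases List.mem_cons.mp h' with rfl | h''
              · exact Or.inl ((PySem.Set.mem_add _ _ _).mpr (Or.inr rfl))
              · exact Or.inr (List.mem_append_left _ h'')
          · exact Or.inr (List.mem_append_right _ ((pvAdj_getD_mem _ _ _).mpr hy))
        have hqr' : ∀ x ∈ qs ++ (pvAdj stars).getD q PySem.Set.empty, 0 ≤ x ∧ x < (stars.length : Int) := by
          intro x hx
          rcases List.mem_append.mp hx with h | h
          · exact hqr x (List.mem_cons_of_mem _ h)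
          · have := (pvAdj_getD_mem _ _ _).mp h
            exact ⟨this.2.2.1, this.2.2.2.1⟩
        have hfuel' : (stars.length - (PySem.Set.add seen q).length) * (stars.length + 1) +
            (qs ++ (pvAdj stars).getD q PySem.Set.empty).length ≤ fuel := by
          have hsl : seen.length < stars.length := pvLen_lt hnd hb hq hq0.1 hq0.2
          have hadjlen : ((pvAdj stars).getD q PySem.Set.empty).length ≤ stars.length :=
            pvLen_le (pvAdj_getD_nodup _ _) (fun x hx => by
              have := (pvAdj_getD_mem _ _ _).mp hx
              exact ⟨this.2.2.1, this.2.2.2.1⟩)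
          have hslen' : (PySem.Set.add seen q).length = seen.length + 1 := by
            rw [hadd]; simp
          obtain ⟨t, ht⟩ : ∃ t, stars.length - seen.length = t + 1 :=
            ⟨stars.length - seen.length - 1, by omega⟩
          have h2 : stars.length - (PySem.Set.add seen q).length = t := by omega
          rw [h2, List.length_append]
          have hexp : (t + 1) * (stars.length + 1) = t * (stars.length + 1) + (stars.length + 1) := by
            ring
          rw [ht, hexp] at hfuel
          simp only [List.length_cons] at hfuel
          set M := t * (stars.length + 1) with hM
          omega
        obtain ⟨c1, c2, c3, c4, c5, c6⟩ := ih _ _ hnd' hb' hK' hqr' hfuel'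
        have hseen : ∀ x ∈ seen, x ∈ pvBFS (pvAdj stars) fuel
            (qs ++ (pvAdj stars).getD q PySem.Set.empty) (PySem.Set.add seen q) :=
          fun x hx => c1 x ((PySem.Set.mem_add _ _ _).mpr (Or.inl hx))
        refine ⟨hseen, ?_, ?_, c4, c5, c6⟩
        · intro x hx
          rcases List.mem_cons.mp hx with rfl | h'
          · exact c1 x ((PySem.Set.mem_add _ _ _).mpr (Or.inr rfl))
          · exact c2 x (List.mem_append_left _ h')
        · intro x hx
          rcases c3 x hx with h | ⟨q', hq', hcc⟩
          · rcases (PySem.Set.mem_add _ _ _).mp h with h' | rfl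
            · exact Or.inl h'
            · exact Or.inr ⟨x, List.mem_cons_self, Relation.ReflTransGen.refl⟩
          · rcases List.mem_append.mp hq' with h' | h'
            · exact Or.inr ⟨q', List.mem_cons_of_mem _ h', hcc⟩
            · exact Or.inr ⟨q, List.mem_cons_self,
                Relation.ReflTransGen.head ((pvAdj_getD_mem _ _ _).mp h') hcc⟩

-- the joint outer-loop invariant
def pvRel (stars : List (Int × Int × Int × Int))
    (a b : PySem.Set Int × Int) : Prop :=
  (∀ x, x ∈ a.1 ↔ x ∈ b.1) ∧ a.2 = b.2 ∧ a.1.Nodup ∧ b.1.Nodup ∧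
  (∀ x ∈ a.1, 0 ≤ x ∧ x < (stars.length : Int)) ∧
  (∀ x ∈ a.1, ∀ y, pvE stars x y → y ∈ a.1)

lemma pvFoldl_rel {α σ τ : Type} (R : σ → τ → Prop) :
    ∀ (L : List α) (f : σ → α → σ) (g : τ → α → τ) (s : σ) (t : τ),
      R s t → (∀ s t x, x ∈ L → R s t → R (f s x) (g t x)) →
      R (L.foldl f s) (L.foldl g t) := by
  intro L
  induction L with
  | nil => intro f g s t h _; exact h
  | cons x L ih =>
    intro f g s t h hstep
    exact ih f g _ _ (hstep s t x List.mem_cons_self h)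
      (fun s t y hy h' => hstep s t y (List.mem_cons_of_mem _ hy) h')

lemma pvStep (stars : List (Int × Int × Int × Int)) (si : Int)
    (hsi0 : 0 ≤ si) (hsi1 : si < (stars.length : Int))
    (a b : PySem.Set Int × Int) (h : pvRel stars a b) :
    pvRel stars
      (if PySem.Set.contains a.1 si then a
       else (pvBFS (pvAdj stars) ((stars.length + 1) * (stars.length + 1)) [si] a.1, a.2 + 1))
      (if PySem.Set.contains b.1 si then b
       else (PySem.Set.update b.1 (pvSat stars stars.length (PySem.Set.add PySem.Set.empty si)), b.2 + 1)) := by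
  obtain ⟨hiff, hcnt, hndA, hndB, hrange, hclosed⟩ := h
  by_cases hmem : si ∈ a.1
  · rw [if_pos ((PySem.Set.contains_iff _ _).mpr hmem),
      if_pos ((PySem.Set.contains_iff _ _).mpr ((hiff si).mp hmem))]
    exact ⟨hiff, hcnt, hndA, hndB, hrange, hclosed⟩
  · have hmemB : si ∉ b.1 := fun h => hmem ((hiff si).mpr h)
    rw [if_neg (fun hcc => hmem ((PySem.Set.contains_iff _ _).mp hcc)),
      if_neg (fun hcc => hmemB ((PySem.Set.contains_iff _ _).mp hcc))]
    -- A-side: the BFS fills in exactly the component of si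
    have hK : ∀ x ∈ a.1, ∀ y, pvE stars x y → y ∈ a.1 ∨ y ∈ [si] :=
      fun x hx y hy => Or.inl (hclosed x hx y hy)
    have hqr : ∀ x ∈ [si], 0 ≤ x ∧ x < (stars.length : Int) := by
      intro x hx
      rcases List.mem_cons.mp hx with rfl | h'
      · exact ⟨hsi0, hsi1⟩
      · exact absurd h' (List.not_mem_nil)
    have hfuel : (stars.length - a.1.length) * (stars.length + 1) + ([si] : List Int).length ≤
        (stars.length + 1) * (stars.length + 1) := by
      have h1 : (stars.length - a.1.length) * (stars.length + 1) ≤ stars.length * (stars.length + 1) :=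
        Nat.mul_le_mul_right _ (Nat.sub_le _ _)
      have h2 : (stars.length + 1) * (stars.length + 1) = stars.length * (stars.length + 1) + (stars.length + 1) := by
        ring
      simp only [List.length_cons, List.length_nil]
      set M := stars.length * (stars.length + 1) with hM
      omega
    obtain ⟨c1, c2, c3, c4, c5, c6⟩ := pvBFS_spec stars _ [si] a.1 hndA hrange hK hqr hfuel
    have hFiff : ∀ x, x ∈ pvBFS (pvAdj stars) ((stars.length + 1) * (stars.length + 1)) [si] a.1 ↔
        (x ∈ a.1 ∨ pvConn stars si x) := by
      intro x
      constructor
      · intro hx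
        rcases c3 x hx with h | ⟨q, hq, hcc⟩
        · exact Or.inl h
        · rcases List.mem_cons.mp hq with rfl | h'
          · exact Or.inr hcc
          · exact absurd h' (List.not_mem_nil)
      · rintro (h | h)
        · exact c1 x h
        · exact pvConn_closed_mem (c2 si List.mem_cons_self) c4 h
    -- B-side: the saturation is exactly the component of si
    have hstart : PySem.Set.add PySem.Set.empty si = [si] := rfl
    have hsat : ∀ x, x ∈ pvSat stars stars.length (PySem.Set.add PySem.Set.empty si) ↔
        pvConn stars si x := by
      rw [hstart]
      apply pvSat_spec stars si stars.length [si] (List.nodup_singleton si) List.mem_cons_self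
      · intro x hx
        rcases List.mem_cons.mp hx with rfl | h'
        · exact ⟨⟨hsi0, hsi1⟩, Relation.ReflTransGen.refl⟩
        · exact absurd h' (List.not_mem_nil)
      · simp
    refine ⟨?_, by simp [hcnt], c5, PySem.Set.nodup_update _ _ hndB, c6, c4⟩
    intro x
    rw [hFiff x, PySem.Set.mem_update b.1 (pvSat stars stars.length (PySem.Set.add PySem.Set.empty si)) x,
      ← hsat x, hiff x]

-- ===== VERDICT (by name: the statement is the Claim_ definition above) =====
theorem find_constellations_spec : Claim_equal_find_constellations := by
  intro stars _
  show find_constellations stars = find_constellations_alt stars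
  unfold find_constellations find_constellations_alt
  have h := pvFoldl_rel (pvRel stars) (PySem.List.pyRange 0 (stars.length : Int))
    (fun st si => if PySem.Set.contains st.1 si then st
      else (pvBFS (pvAdj stars) ((stars.length + 1) * (stars.length + 1)) [si] st.1, st.2 + 1))
    (fun st i => if PySem.Set.contains st.1 i then st
      else (PySem.Set.update st.1 (pvSat stars stars.length (PySem.Set.add PySem.Set.empty i)), st.2 + 1))
    (PySem.Set.empty, (0 : Int)) (PySem.Set.empty, (0 : Int))
    ⟨fun x => Iff.rfl, rfl, List.nodup_nil, List.nodup_nil,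
      fun x hx => absurd hx (List.not_mem_nil), fun x hx => absurd hx (List.not_mem_nil)⟩
    (fun a b x hx h' => pvStep stars x (PySem.List.mem_pyRange_one.mp hx).1
      (PySem.List.mem_pyRange_one.mp hx).2 a b h')
  exact h.2.1
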